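-- pv_equiv track=rewrite | github.com/Mulindi123/Worked-Katas | day2/revsub.py | rev_sub
-- ===== SOURCE A (Python) =====
-- def rev_sub(arr):
--     result = []
--     sub = []
--     for a in arr:
--         if a % 2 == 0:            #Even numbers
--             sub.append(a)
--         else:
--             if sub:                 # Check that the sub list is not empty
--                 sub.reverse()
--                 result.extend(sub)
--                 sub =[]
--
--             result.append(a)
--
--     if sub:
--         sub.reverse()
--         result.extend(sub)
--
--     return result
-- ===== SOURCE B (Python) =====
-- def rev_sub(arr):
--     # Staged-pass index-mirror algorithm: for each position compute the start and
--     # end index of the maximal even run containing it (two scans), then map every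
--     # even position i to the element at its mirror index start[i] + end[i] - i.
--     n = len(arr)
--     start = [0] * n
--     for i in range(n):
--         if i > 0 and arr[i] % 2 == 0 and arr[i - 1] % 2 == 0:
--             start[i] = start[i - 1]
--         else:
--             start[i] = i
--     end = [0] * n
--     for i in range(n - 1, -1, -1):
--         if i < n - 1 and arr[i] % 2 == 0 and arr[i + 1] % 2 == 0:
--             end[i] = end[i + 1]
--         else:
--             end[i] = i
--     return [arr[start[i] + end[i] - i] if arr[i] % 2 == 0 else arr[i]
--             for i in range(n)]
-- ===== Notes on version B (the rewrite author's own statement) =====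
-- stated objective: alternative
-- what changed: Replaces A's single pass with a flushed even sub-buffer by three staged passes: forward/backward scans computing run-start and run-end index arrays for even runs, then a final map sending every even position i to its mirror index start[i]+end[i]-i (odd positions unchanged).
import Mathlib
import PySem

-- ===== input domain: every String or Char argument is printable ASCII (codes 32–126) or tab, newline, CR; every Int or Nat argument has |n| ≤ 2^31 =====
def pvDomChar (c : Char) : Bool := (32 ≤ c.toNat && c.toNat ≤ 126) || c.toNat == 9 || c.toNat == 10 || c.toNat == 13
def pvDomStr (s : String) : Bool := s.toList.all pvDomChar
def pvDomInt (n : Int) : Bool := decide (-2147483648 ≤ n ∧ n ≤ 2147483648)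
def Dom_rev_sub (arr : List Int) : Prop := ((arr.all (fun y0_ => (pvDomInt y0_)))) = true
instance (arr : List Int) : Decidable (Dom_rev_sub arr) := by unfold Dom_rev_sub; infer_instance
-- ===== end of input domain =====

-- B replaces A's buffered single pass by three staged passes: scans computing the
-- start and end index of each maximal even run, then a map sending every even
-- position to its mirror index inside its run. Same return value.

-- the test `x % 2 == 0` shared by both Pythons; Lean's `%` agrees with Python's for divisor 2
def pvEven (x : Int) : Bool := x % 2 == 0

-- ===== PORT A =====
-- the for loop over arr with state (result, sub)
def rev_sub (arr : List Int) : List Int :=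
  let st := arr.foldl (fun (st : List Int × List Int) a =>
    if pvEven a then (st.1, st.2 ++ [a])
    else (st.1 ++ st.2.reverse ++ [a], [])) ([], [])
  st.1 ++ st.2.reverse

-- ===== PORT B =====
-- Source B's three passes; every Python list index here is in range, so `getD _ 0` is
-- exact (Python would raise only out of range).  The descending `for i in
-- range(n-1,-1,-1)` filling `end` becomes a foldr over `range n` prepending, so
-- `end[i+1]` is the accumulator's head.
def rev_sub_alt (arr : List Int) : List Int :=
  let n := arr.length
  let start := (List.range n).foldl
    (fun (s : List Nat) i =>
      s ++ [if 0 < i ∧ pvEven (arr.getD i 0) = true ∧ pvEven (arr.getD (i-1) 0) = true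
            then s.getD (i-1) 0 else i]) []
  let stop := (List.range n).foldr
    (fun i (e : List Nat) =>
      (if i + 1 < n ∧ pvEven (arr.getD i 0) = true ∧ pvEven (arr.getD (i+1) 0) = true
       then e.headD 0 else i) :: e) []
  (List.range n).map (fun i =>
    if pvEven (arr.getD i 0) = true
    then arr.getD (start.getD i 0 + stop.getD i 0 - i) 0
    else arr.getD i 0)

-- ===== PRECONDITION & SPEC =====
def Spec_rev_sub (arr : List Int) (out : List Int) : Prop := out = rev_sub_alt arr
instance (arr : List Int) (out : List Int) : Decidable (Spec_rev_sub arr out) := by unfold Spec_rev_sub; infer_instance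

-- ===== CLAIM (what is proved, stated in full; the proofs are below) =====
def Claim_equal_rev_sub : Prop := ∀ (arr : List Int), Dom_rev_sub arr → Spec_rev_sub arr (rev_sub arr)

-- ===== LEMMAS AND PROOFS =====

-- proof-only middle form: the run decomposition (maximal same-parity runs, even ones reversed)
def gsplit (arr : List Int) : List Int :=
  match arr with
  | [] => []
  | a :: t =>
    let k : Bool := pvEven a
    let g := a :: t.takeWhile (fun x => pvEven x == k)
    let rest := t.dropWhile (fun x => pvEven x == k)
    (if k then g.reverse else g) ++ gsplit rest
termination_by arr.length
decreasing_by
  exact Nat.lt_succ_of_le (List.length_dropWhile_le _ _)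

-- ---- A = gsplit ----

lemma gsplit_even_run (t : List Int) :
    (t.takeWhile (fun x => pvEven x == true)).reverse
        ++ gsplit (t.dropWhile (fun x => pvEven x == true))
      = gsplit t := by
  cases t with
  | nil => simp
  | cons a t =>
    cases hk : pvEven a with
    | true =>
      conv_rhs => rw [gsplit.eq_def]
      simp only [List.takeWhile_cons, List.dropWhile_cons, hk, Bool.true_beq, if_true,
        List.reverse_cons, List.append_assoc, List.cons_append, List.nil_append]
    | false =>
      simp [hk]

lemma gsplit_odd_run (t : List Int) :
    (t.takeWhile (fun x => pvEven x == false))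
        ++ gsplit (t.dropWhile (fun x => pvEven x == false))
      = gsplit t := by
  cases t with
  | nil => simp
  | cons a t =>
    cases hk : pvEven a with
    | true =>
      simp [hk]
    | false =>
      conv_rhs => rw [gsplit.eq_def]
      simp only [List.takeWhile_cons, List.dropWhile_cons, hk, Bool.false_beq,
        Bool.not_false, if_true, Bool.false_eq_true, if_false, List.cons_append]

lemma gsplit_cons_odd (a : Int) (t : List Int) (h : pvEven a = false) :
    gsplit (a :: t) = a :: gsplit t := by
  conv_lhs => rw [gsplit.eq_def]
  simp only [h, Bool.false_eq_true, if_false, List.cons_append]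
  rw [gsplit_odd_run t]

lemma loop_invariant (l : List Int) : ∀ (result sub : List Int),
    (let st := l.foldl (fun (st : List Int × List Int) a =>
        if pvEven a then (st.1, st.2 ++ [a])
        else (st.1 ++ st.2.reverse ++ [a], [])) (result, sub)
     st.1 ++ st.2.reverse)
      = result ++ (sub ++ l.takeWhile (fun x => pvEven x == true)).reverse
          ++ gsplit (l.dropWhile (fun x => pvEven x == true)) := by
  induction l with
  | nil =>
    intro result sub
    simp [gsplit]
  | cons a t ih =>
    intro result sub
    cases hk : pvEven a with
    | true =>
      simp only [List.foldl_cons, hk, if_true]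
      rw [ih]
      simp [hk]
    | false =>
      simp only [List.foldl_cons, hk, Bool.false_eq_true, if_false]
      rw [ih]
      simp only [List.takeWhile_cons, List.dropWhile_cons, hk, Bool.false_beq,
        Bool.not_true, Bool.false_eq_true, if_false, List.nil_append]
      rw [gsplit_cons_odd a t hk]
      simp only [List.append_assoc, List.append_nil]
      rw [gsplit_even_run t]
      simp

lemma A_eq_gsplit (arr : List Int) : rev_sub arr = gsplit arr := by
  unfold rev_sub
  have h := loop_invariant arr [] []
  simp only [List.nil_append] at h
  rw [h, gsplit_even_run arr]

-- ---- B = gsplit ----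

-- recursive characterisations of the two index arrays
def sidx (arr : List Int) : Nat → Nat
  | 0 => 0
  | i+1 => if pvEven (arr.getD (i+1) 0) = true ∧ pvEven (arr.getD i 0) = true
           then sidx arr i else i+1

def eidx (arr : List Int) (i : Nat) : Nat :=
  if h : i + 1 < arr.length ∧ pvEven (arr.getD i 0) = true ∧ pvEven (arr.getD (i+1) 0) = true
  then eidx arr (i+1) else i
termination_by arr.length - i
decreasing_by omega

lemma getD_map_range {α : Type} [Inhabited α] (g : Nat → α) {n i : Nat} (h : i < n) (d : α) :
    ((List.range n).map g).getD i d = g i := by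
  have h' : i < ((List.range n).map g).length := by simpa using h
  rw [List.getD_eq_getElem _ _ h']
  simp

lemma mkStart_eq (arr : List Int) (n : Nat) :
    (List.range n).foldl
      (fun (s : List Nat) i =>
        s ++ [if 0 < i ∧ pvEven (arr.getD i 0) = true ∧ pvEven (arr.getD (i-1) 0) = true
              then s.getD (i-1) 0 else i]) []
    = (List.range n).map (sidx arr) := by
  induction n with
  | zero => simp
  | succ n ih =>
    rw [List.range_succ, List.foldl_append, ih, List.map_append]
    simp only [List.foldl_cons, List.foldl_nil, List.map_cons, List.map_nil]
    congr 2
    cases n with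
    | zero => simp [sidx]
    | succ m =>
      have hm : (m + 1) - 1 = m := rfl
      rw [hm, getD_map_range (sidx arr) (Nat.lt_succ_self m) 0]
      by_cases hc : pvEven (arr.getD (m+1) 0) = true ∧ pvEven (arr.getD m 0) = true
      · rw [if_pos ⟨Nat.succ_pos m, hc.1, hc.2⟩, sidx, if_pos hc]
      · rw [sidx, if_neg hc, if_neg (by tauto)]

lemma mkStop_eq (arr : List Int) :
    (List.range arr.length).foldr
      (fun i (e : List Nat) =>
        (if i + 1 < arr.length ∧ pvEven (arr.getD i 0) = true ∧ pvEven (arr.getD (i+1) 0) = true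
         then e.headD 0 else i) :: e) []
    = (List.range arr.length).map (eidx arr) := by
  have aux : ∀ (m i : Nat), i + m = arr.length →
      (List.range' i m).foldr
        (fun i (e : List Nat) =>
          (if i + 1 < arr.length ∧ pvEven (arr.getD i 0) = true ∧ pvEven (arr.getD (i+1) 0) = true
           then e.headD 0 else i) :: e) []
      = (List.range' i m).map (eidx arr) := by
    intro m
    induction m with
    | zero => intro i h; simp
    | succ m ih =>
      intro i h
      rw [List.range'_succ, List.foldr_cons, ih (i+1) (by omega), List.map_cons]
      congr 1
      by_cases hc : i + 1 < arr.length ∧ pvEven (arr.getD i 0) = true ∧ pvEven (arr.getD (i+1) 0) = true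
      · rw [if_pos hc]
        have hm : 0 < m := by omega
        conv_rhs => rw [eidx]
        rw [dif_pos hc]
        cases m with
        | zero => omega
        | succ m' => simp [List.range'_succ]
      · rw [if_neg hc]
        conv_rhs => rw [eidx]
        rw [dif_neg hc]
  rw [List.range_eq_range']
  exact aux arr.length 0 (by omega)

lemma B_eq_map (arr : List Int) :
    rev_sub_alt arr = (List.range arr.length).map (fun i =>
      if pvEven (arr.getD i 0) = true
      then arr.getD (sidx arr i + eidx arr i - i) 0
      else arr.getD i 0) := by
  simp only [rev_sub_alt]
  rw [mkStart_eq, mkStop_eq]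
  apply List.map_congr_left
  intro i hi
  rw [List.mem_range] at hi
  rw [getD_map_range _ hi, getD_map_range _ hi]

lemma sidx_le (arr : List Int) : ∀ i, sidx arr i ≤ i := by
  intro i
  induction i with
  | zero => simp [sidx]
  | succ i ih =>
    rw [sidx]
    split_ifs with h
    · omega
    · exact le_refl _

lemma eidx_ge (arr : List Int) : ∀ i, i ≤ eidx arr i := by
  have aux : ∀ c i, arr.length - i ≤ c → i ≤ eidx arr i := by
    intro c
    induction c with
    | zero =>
      intro i h
      rw [eidx, dif_neg (by omega)]
    | succ c ih =>
      intro i h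
      rw [eidx]
      split_ifs with hc
      · exact le_trans (by omega) (ih (i+1) (by omega))
      · exact le_refl _
  intro i
  exact aux (arr.length - i) i (le_refl _)

lemma dropWhile_getD_zero (q : Int → Bool) : ∀ l : List Int,
    0 < (l.dropWhile q).length → q ((l.dropWhile q).getD 0 0) = false := by
  intro l
  induction l with
  | nil => intro h; simp at h
  | cons b l ih =>
    intro h
    rw [List.dropWhile_cons] at h ⊢
    by_cases hb : q b = true
    · rw [if_pos hb] at h ⊢; exact ih h
    · rw [if_neg hb] at h ⊢
      simpa using hb

-- the run-block step: B on a run decomposition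
lemma B_step (n : Nat) (ih : ∀ arr : List Int, arr.length ≤ n → rev_sub_alt arr = gsplit arr)
    (a : Int) (t : List Int) (hlt : (a :: t).length ≤ n + 1) :
    rev_sub_alt (a :: t) = gsplit (a :: t) := by
  set k := pvEven a with hk
  set g : List Int := a :: t.takeWhile (fun x => pvEven x == k) with hg
  set r : List Int := t.dropWhile (fun x => pvEven x == k) with hr
  set m := g.length with hm
  have hgr : a :: t = g ++ r := by
    rw [hg, hr, List.cons_append, List.takeWhile_append_dropWhile]
  have hmpos : 0 < m := by rw [hm, hg]; simp
  have hlen : (g ++ r).length = m + r.length := by rw [List.length_append]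
  have hrlen : r.length ≤ t.length := List.length_dropWhile_le _ _
  -- every element of g has parity k
  have hgmem : ∀ x ∈ g, pvEven x = k := by
    intro x hx
    rcases List.mem_cons.mp hx with rfl | hx
    · rfl
    · simpa using List.mem_takeWhile_imp hx
  have G1 : ∀ i, i < m → pvEven ((g ++ r).getD i 0) = k := by
    intro i hi
    have hi' : i < g.length := hi
    rw [List.getD_append _ _ _ _ hi', List.getD_eq_getElem _ _ hi']
    exact hgmem _ (List.getElem_mem _)
  have G2 : r ≠ [] → pvEven (r.getD 0 0) ≠ k := by
    intro hne hEq
    have h0 : 0 < r.length := List.length_pos_iff.mpr hne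
    have h0' := h0
    rw [hr] at h0'
    have hq := dropWhile_getD_zero (fun x => pvEven x == k) t h0'
    rw [← hr] at hq
    simp only [List.getD_eq_getElem?_getD] at hEq
    simp at hq
    exact hq hEq
  have A1 : ∀ j, (g ++ r).getD (m + j) 0 = r.getD j 0 := by
    intro j
    rw [List.getD_append_right _ _ _ _ (by omega)]
    congr 1
    omega
  -- sidx and eidx shift past the first run
  have SS : ∀ j, j < r.length → sidx (g ++ r) (m + j) = m + sidx r j := by
    intro j
    induction j with
    | zero =>
      intro hj
      have hrne : r ≠ [] := by
        intro h; rw [h] at hj; simp at hj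
      have ha : (g ++ r).getD m 0 = r.getD 0 0 := by simpa using A1 0
      obtain ⟨m', hmc⟩ : ∃ m', m = m' + 1 := ⟨m - 1, by omega⟩
      have h0 : sidx r 0 = 0 := rfl
      rw [Nat.add_zero, h0, Nat.add_zero, hmc, sidx, if_neg]
      rintro ⟨h1, h2⟩
      cases hkc : k with
      | true =>
        rw [← hmc, ha] at h1
        exact G2 hrne (by rw [h1, hkc])
      | false =>
        have hg1 := G1 m' (by omega)
        rw [hg1, hkc] at h2
        exact Bool.false_ne_true h2
    | succ j ihj =>
      intro hj
      have e1 : (g ++ r).getD (m + (j + 1)) 0 = r.getD (j + 1) 0 := A1 (j + 1)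
      have e0 : (g ++ r).getD (m + j) 0 = r.getD j 0 := A1 j
      have hstep : m + (j + 1) = (m + j) + 1 := by omega
      rw [hstep, sidx, sidx]
      rw [← hstep, e1, e0]
      by_cases hc : pvEven (r.getD (j+1) 0) = true ∧ pvEven (r.getD j 0) = true
      · rw [if_pos hc, if_pos hc, ihj (by omega)]
      · rw [if_neg hc, if_neg hc]
  have ES : ∀ j, eidx (g ++ r) (m + j) = m + eidx r j := by
    have aux : ∀ c j, r.length - j ≤ c → eidx (g ++ r) (m + j) = m + eidx r j := by
      intro c
      induction c with
      | zero =>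
        intro j h
        rw [eidx, dif_neg (by rintro ⟨h1, h2, h3⟩; rw [hlen] at h1; omega),
          eidx, dif_neg (by rintro ⟨h1, h2, h3⟩; omega)]
      | succ c ihc =>
        intro j h
        by_cases hc : j + 1 < r.length ∧ pvEven (r.getD j 0) = true ∧ pvEven (r.getD (j+1) 0) = true
        · rw [eidx, dif_pos (by
            refine ⟨by rw [hlen]; omega, ?_, ?_⟩
            · rw [A1 j]; exact hc.2.1
            · have : m + j + 1 = m + (j + 1) := by omega
              rw [this, A1 (j+1)]; exact hc.2.2)]
          have : m + j + 1 = m + (j + 1) := by omega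
          rw [this, ihc (j+1) (by omega)]
          conv_rhs => rw [eidx]
          rw [dif_pos hc]
        · rw [eidx, dif_neg (by
            rintro ⟨h1, h2, h3⟩
            apply hc
            refine ⟨by rw [hlen] at h1; omega, ?_, ?_⟩
            · rw [← A1 j]; exact h2
            · have he : m + j + 1 = m + (j + 1) := by omega
              rw [← A1 (j+1), ← he]; exact h3)]
          conv_rhs => rw [eidx]
          rw [dif_neg (by
            rintro ⟨h1, h2, h3⟩
            apply hc
            exact ⟨h1, h2, h3⟩)]
    intro j
    exact aux (r.length - j) j (le_refl _)
  -- inside an even first run, sidx is 0 and eidx is m-1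
  have S1 : k = true → ∀ i, i < m → sidx (g ++ r) i = 0 := by
    intro hkt i
    induction i with
    | zero => intro _; simp [sidx]
    | succ i ihi =>
      intro hi
      rw [sidx, if_pos ⟨by rw [G1 (i+1) hi, hkt], by rw [G1 i (by omega), hkt]⟩]
      exact ihi (by omega)
  have S2 : k = true → ∀ i, i < m → eidx (g ++ r) i = m - 1 := by
    intro hkt
    have aux : ∀ c i, i < m → m - i ≤ c → eidx (g ++ r) i = m - 1 := by
      intro c
      induction c with
      | zero => intro i hi h; omega
      | succ c ihc =>
        intro i hi h
        by_cases hi1 : i + 1 < m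
        · rw [eidx, dif_pos ⟨by rw [hlen]; omega, by rw [G1 i hi, hkt], by rw [G1 (i+1) hi1, hkt]⟩]
          exact ihc (i+1) hi1 (by omega)
        · rw [eidx, dif_neg]
          · omega
          · rintro ⟨h1, h2, h3⟩
            have him : i + 1 = m := by omega
            have hrne : r ≠ [] := by
              intro hemp
              rw [hlen, hemp] at h1
              simp at h1
              omega
            have hrne2 := hrne
            have : (g ++ r).getD (i + 1) 0 = r.getD 0 0 := by
              have := A1 0; rw [Nat.add_zero] at this; rw [him]; exact this
            rw [this] at h3
            exact (G2 hrne) (by rw [h3, hkt])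
    intro i hi
    exact aux m i hi (by omega)
  -- assemble
  rw [B_eq_map]
  conv_rhs => rw [gsplit]
  simp only [← hk, ← hg, ← hr]
  have hlena : (a :: t).length = m + r.length := by rw [hgr]; exact hlen
  rw [hlena, List.range_add, List.map_append, List.map_map]
  congr 1
  · -- first chunk equals the (possibly reversed) first run
    cases hkc : k with
    | true =>
      rw [if_pos rfl]
      apply List.ext_getElem (by simp [hm])
      intro i h1 h2
      have him : i < m := by simpa using h1
      simp only [List.getElem_map, List.getElem_range]
      rw [hgr]
      rw [if_pos (by rw [G1 i him, hkc])]
      rw [S1 hkc i him, S2 hkc i him, Nat.zero_add]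
      have hmi : m - 1 - i < m := by omega
      rw [List.getD_append _ _ _ _ (by exact hmi), List.getD_eq_getElem _ _ hmi]
      rw [List.getElem_reverse]
    | false =>
      rw [if_neg (by simp)]
      apply List.ext_getElem (by simp [hm])
      intro i h1 h2
      have him : i < m := by simpa using h1
      simp only [List.getElem_map, List.getElem_range]
      rw [hgr]
      rw [if_neg (by rw [G1 i him, hkc]; simp)]
      rw [List.getD_append _ _ _ _ (by exact him), List.getD_eq_getElem _ _ him]
  · -- second chunk equals B on the rest, then gsplit by induction
    rw [← ih r (by omega), B_eq_map]
    apply List.map_congr_left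
    intro j hj
    rw [List.mem_range] at hj
    simp only [Function.comp]
    rw [hgr, A1 j, SS j hj, ES j]
    by_cases hp : pvEven (r.getD j 0) = true
    · rw [if_pos hp, if_pos hp]
      have h1 := sidx_le r j
      have h2 := eidx_ge r j
      have : m + sidx r j + (m + eidx r j) - (m + j) = m + (sidx r j + eidx r j - j) := by omega
      rw [this, A1]
    · rw [if_neg hp, if_neg hp]

lemma B_eq_gsplit (arr : List Int) : rev_sub_alt arr = gsplit arr := by
  have aux : ∀ n (arr : List Int), arr.length ≤ n → rev_sub_alt arr = gsplit arr := by
    intro n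
    induction n with
    | zero =>
      intro arr h
      have : arr = [] := List.length_eq_zero_iff.mp (by omega)
      subst this
      simp [rev_sub_alt, gsplit]
    | succ n ih =>
      intro arr h
      cases arr with
      | nil => simp [rev_sub_alt, gsplit]
      | cons a t => exact B_step n ih a t h
  exact aux arr.length arr (le_refl _)

-- ===== VERDICT (by name: the statement is the Claim_ definition above) =====
theorem rev_sub_spec : Claim_equal_rev_sub := by
  intro arr _
  unfold Spec_rev_sub
  rw [A_eq_gsplit, B_eq_gsplit]
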